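-- pv_equiv track=rewrite | github.com/dudamarlena/pyc_source | pycfiles/multiqc-1.8.tar/VariantCallingMetrics.py | table_in
-- ===== SOURCE A (Python) =====
-- def table_in(filehandle, pre_header_string):
--     """ Generator that assumes a table starts the line after a given string """
--     in_histogram = False
--     next_is_header = False
--     headers = list()
--     for line in stripped(filehandle):
--         if not in_histogram and line.startswith(pre_header_string):
--             in_histogram = True
--             next_is_header = True
--         elif in_histogram and next_is_header:
--             next_is_header = False
--             headers = line.split('\t')
--         elif in_histogram:
--             values = line.split('\t')
--             if values != ['']:
--                 for couple in zip(headers, values):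
--                     yield couple
--
-- def stripped(iterator):
--     """ Generator to strip string of whitespace """
--     for item in iterator:
--         yield item.strip()
-- ===== SOURCE B (Python) =====
-- def table_in(filehandle, pre_header_string):
--     """Staged whole-list computation: a strip pass, a marker-flag pass with .index,
--     list slicing, then one flat comprehension; no per-line state machine."""
--     lines = [raw.strip() for raw in filehandle]
--     marks = [line.startswith(pre_header_string) for line in lines]
--     if True not in marks:
--         return
--     rest = lines[marks.index(True) + 1:]
--     if not rest:
--         return
--     headers = rest[0].split('\t')
--     yield from (pair
--                 for values in (line.split('\t') for line in rest[1:])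
--                 if values != ['']
--                 for pair in zip(headers, values))
-- ===== Notes on version B (the rewrite author's own statement) =====
-- stated objective: alternative
-- what changed: Replaces A's one-pass boolean state machine with whole-list staged computation: materialise stripped lines, compute a list of marker flags, locate the table with marks.index(True) and list slicing, and emit all pairs by one flat comprehension (flatMap) over the value lines.
import Mathlib
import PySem

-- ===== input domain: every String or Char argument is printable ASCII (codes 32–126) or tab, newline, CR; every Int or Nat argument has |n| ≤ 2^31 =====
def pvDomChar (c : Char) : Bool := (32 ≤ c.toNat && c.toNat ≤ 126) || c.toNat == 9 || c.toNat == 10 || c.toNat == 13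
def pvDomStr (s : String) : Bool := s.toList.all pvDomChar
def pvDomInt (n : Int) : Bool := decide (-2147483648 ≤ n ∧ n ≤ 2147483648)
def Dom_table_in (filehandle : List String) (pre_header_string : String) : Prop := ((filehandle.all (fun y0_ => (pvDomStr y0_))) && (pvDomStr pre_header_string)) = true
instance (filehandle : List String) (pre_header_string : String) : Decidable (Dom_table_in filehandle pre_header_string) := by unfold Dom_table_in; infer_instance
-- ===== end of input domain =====

-- B replaces A's one-pass boolean state machine by whole-list staged computation
-- (stripped lines, marker-flag list + index, slices, one flatMap) — objective: alternative.

-- s.split('\t') : sep non-empty, exact via PySem.Chars.splitOn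
def pySplitTab (s : String) : List String := (PySem.Chars.splitOn s.toList ['\t']).map String.ofList

-- ===== PORT A =====
-- state: (in_histogram, next_is_header, headers, emitted pairs)
def table_in (filehandle : List String) (pre_header_string : String) : List (String × String) :=
  (filehandle.foldl (fun (st : Bool × Bool × List String × List (String × String)) item =>
    let line := PySem.Str.strip item
    let (in_histogram, next_is_header, headers, acc) := st
    if !in_histogram && PySem.Str.startswith line pre_header_string then
      (true, true, headers, acc)
    else if in_histogram && next_is_header then
      (true, false, pySplitTab line, acc)
    else if in_histogram then
      let values := pySplitTab line
      if values ≠ [""] then (in_histogram, next_is_header, headers, acc ++ headers.zip values)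
      else (in_histogram, next_is_header, headers, acc)
    else (in_histogram, next_is_header, headers, acc)) (false, false, [], [])).2.2.2

-- ===== PORT B =====
-- Source B line by line: lines / marks are whole-list maps; 'True not in marks' + 'marks.index(True)'
-- is PySem.List.index? (none exactly when True ∉ marks); 'lines[i+1:]' with i : Nat is List.drop (i+1);
-- the flat comprehension is flatMap.
def table_in_alt (filehandle : List String) (pre_header_string : String) : List (String × String) :=
  let lines := filehandle.map PySem.Str.strip
  let marks := lines.map (fun line => PySem.Str.startswith line pre_header_string)
  match PySem.List.index? marks true with
  | none => []
  | some i =>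
    match lines.drop (i + 1) with
    | [] => []
    | h :: t =>
      let headers := pySplitTab h
      t.flatMap (fun line =>
        let values := pySplitTab line
        if values ≠ [""] then headers.zip values else [])

-- ===== PRECONDITION & SPEC =====
def Spec_table_in (filehandle : List String) (pre_header_string : String) (out : List (String × String)) : Prop := out = table_in_alt filehandle pre_header_string
instance (filehandle : List String) (pre_header_string : String) (out : List (String × String)) : Decidable (Spec_table_in filehandle pre_header_string out) := by unfold Spec_table_in; infer_instance

-- ===== CLAIM (what is proved, stated in full; the proofs are below) =====
def Claim_equal_table_in : Prop := ∀ (filehandle : List String) (pre_header_string : String), Dom_table_in filehandle pre_header_string → Spec_table_in filehandle pre_header_string (table_in filehandle pre_header_string)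

-- ===== LEMMAS AND PROOFS =====

-- A's loop body as a named function, for the lemmas
def aStep (p : String) (st : Bool × Bool × List String × List (String × String)) (item : String) :
    Bool × Bool × List String × List (String × String) :=
  let line := PySem.Str.strip item
  let (in_histogram, next_is_header, headers, acc) := st
  if !in_histogram && PySem.Str.startswith line p then
    (true, true, headers, acc)
  else if in_histogram && next_is_header then
    (true, false, pySplitTab line, acc)
  else if in_histogram then
    let values := pySplitTab line
    if values ≠ [""] then (in_histogram, next_is_header, headers, acc ++ headers.zip values)
    else (in_histogram, next_is_header, headers, acc)
  else (in_histogram, next_is_header, headers, acc)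

theorem table_in_eq_fold (fh : List String) (p : String) :
    table_in fh p = (fh.foldl (aStep p) (false, false, [], [])).2.2.2 := rfl

-- B's row phase as a named function
def bRows (headers : List String) (rest : List String) : List (String × String) :=
  rest.flatMap (fun line =>
    let values := pySplitTab line
    if values ≠ [""] then headers.zip values else [])

-- phase 3: once in_histogram ∧ ¬next_is_header, headers are fixed and pairs accumulate
theorem fold_phase3 (p : String) (hdrs : List String) (rest : List String)
    (acc : List (String × String)) :
    (rest.foldl (aStep p) (true, false, hdrs, acc)).2.2.2 =
      acc ++ bRows hdrs (rest.map PySem.Str.strip) := by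
  induction rest generalizing acc with
  | nil => simp [bRows]
  | cons l ls ih =>
      simp only [List.foldl_cons, aStep, List.map_cons, bRows, List.flatMap_cons]
      split_ifs <;> simp_all [bRows]

-- phase 2: the next line becomes the headers
theorem fold_phase2 (p : String) (hdrs0 : List String) (rest : List String) :
    (rest.foldl (aStep p) (true, true, hdrs0, ([] : List (String × String)))).2.2.2 =
      (match rest.map PySem.Str.strip with
       | [] => []
       | h :: t => bRows (pySplitTab h) t) := by
  cases rest with
  | nil => rfl
  | cons h t =>
      simp only [List.foldl_cons, aStep]
      rw [if_neg (by simp), if_pos (by simp)]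
      simpa using fold_phase3 p _ t []

-- the whole fold equals B
theorem fold_eq_alt (fh : List String) (p : String) :
    (fh.foldl (aStep p) (false, false, [], [])).2.2.2 = table_in_alt fh p := by
  induction fh with
  | nil => rfl
  | cons l ls ih =>
      simp only [List.foldl_cons, aStep]
      by_cases h : PySem.Chars.startswith (PySem.Chars.strip l.toList) p.toList = true
      · rw [if_pos (by simp [h])]
        rw [fold_phase2 p [] ls]
        simp only [table_in_alt, List.map_cons, PySem.Str.startswith_eq, PySem.Str.toList_strip, h]
        rw [PySem.List.index?_cons_self]
        simp only [List.drop_succ_cons, List.drop_zero]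
        cases hls : ls.map PySem.Str.strip <;> rfl
      · have hb : PySem.Chars.startswith (PySem.Chars.strip l.toList) p.toList = false := by
          simpa using h
        rw [if_neg (by simp [hb]), if_neg (by simp), if_neg (by simp), ih]
        simp only [table_in_alt, List.map_cons, PySem.Str.startswith_eq, PySem.Str.toList_strip, hb]
        rw [PySem.List.index?_cons_of_ne _ (by simp)]
        cases hidx : PySem.List.index?
            ((ls.map PySem.Str.strip).map (fun line => PySem.Chars.startswith line.toList p.toList)) true with
        | none => simp
        | some i => simp [List.drop_succ_cons]

-- ===== VERDICT (by name: the statement is the Claim_ definition above) =====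
theorem table_in_spec : Claim_equal_table_in := by
  intro fh p _
  show table_in fh p = table_in_alt fh p
  rw [table_in_eq_fold]
  exact fold_eq_alt fh p
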